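-- pv_equiv track=rewrite | github.com/TeogopK/Data_Structures_and_Algorithms_FMI | Exams/Seminar/Exam_01/Task2/py_solution_nlog.py | solve
-- ===== SOURCE A (Python) =====
-- def solve(nums, N):
--     results = [0] * N
--
--     # Adding the index in the starting array for each num
--     nums_indexes = [(start_index, x) for start_index, x in enumerate(nums)]
--
--     # Sorting so that the largest element is first
--     nums_indexes.sort(key=lambda x: -x[1])
--
--     count = 0
--     prev_number = -1  # Invalid value
--
--     for i, (start_index, x) in enumerate(nums_indexes):
--         # If we have the same number we do not increase the count
--         if prev_number != x:
--             count = i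
--             prev_number = x
--
--         # The largest number will have 0 before it. The next one will have *i*, if it is different.
--         # This is based on the different numbers before the current number in the sorted array.
--         results[start_index] = count
--
--     return results
-- ===== SOURCE B (Python) =====
-- def solve(nums, N):
--     results = [0] * N
--     for i, x in enumerate(nums):
--         results[i] = sum(1 for y in nums if y > x)
--     return results
-- ===== Notes on version B (the rewrite author's own statement) =====
-- stated objective: simpler
-- what changed: Replaces the sort-then-rank sweep (sort by descending value, track previous value and a running distinct-rank counter, scatter by original index) with a direct per-element count of strictly greater elements.
import Mathlib
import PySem

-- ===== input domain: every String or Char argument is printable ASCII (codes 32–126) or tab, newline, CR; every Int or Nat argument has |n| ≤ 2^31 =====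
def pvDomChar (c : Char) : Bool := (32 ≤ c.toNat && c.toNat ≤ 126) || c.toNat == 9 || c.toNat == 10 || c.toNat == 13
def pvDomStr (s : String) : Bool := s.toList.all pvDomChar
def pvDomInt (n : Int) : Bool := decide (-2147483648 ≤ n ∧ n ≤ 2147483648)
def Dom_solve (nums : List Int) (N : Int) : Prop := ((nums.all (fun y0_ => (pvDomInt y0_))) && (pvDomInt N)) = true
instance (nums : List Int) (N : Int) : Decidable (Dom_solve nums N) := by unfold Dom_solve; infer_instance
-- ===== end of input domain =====

-- B replaces A's sort-then-rank sweep by a direct count of strictly greater elements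
-- for each position; return values agree on Pre_ (A mutates nothing observable).

-- ===== PORT A =====
-- index assignments results[start_index] = count use pySetD; within Pre_ every such
-- index is in range, so this is exact there (out-of-range inputs, where Python raises
-- IndexError, are excluded by Pre_solve).
def solve (nums : List Int) (N : Int) : List Int :=
  let results := List.replicate N.toNat 0
  let nums_indexes := (PySem.List.enumerate nums).map (fun p => (p.1, p.2))
  let ns := PySem.List.sorted nums_indexes (fun p => -p.2) false
  let final := (PySem.List.enumerate ns).foldl
    (fun (st : Int × Int × List Int) q =>
      let count := if st.2.1 ≠ q.2.2 then q.1 else st.1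
      (count, q.2.2, PySem.List.pySetD st.2.2 q.2.1 count))
    (0, -1, results)
  final.2.2

-- ===== PORT B =====
def solve_alt (nums : List Int) (N : Int) : List Int :=
  let results := List.replicate N.toNat 0
  (PySem.List.enumerate nums).foldl
    (fun res p => PySem.List.pySetD res p.1 ((nums.filter (fun y => p.2 < y)).length : Int))
    results

-- ===== PRECONDITION & SPEC =====
-- Pre_ excludes exactly the inputs where both Pythons raise IndexError: a nonempty
-- nums with more elements than [0]*N has slots.
def Pre_solve (nums : List Int) (N : Int) : Prop := nums = [] ∨ (nums.length : Int) ≤ N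
instance (nums : List Int) (N : Int) : Decidable (Pre_solve nums N) := by unfold Pre_solve; infer_instance
def pvWitness_solve : List Int × Int := ([3, 1, 3, 2], 5)

def Spec_solve (nums : List Int) (N : Int) (out : List Int) : Prop := out = solve_alt nums N
instance (nums : List Int) (N : Int) (out : List Int) : Decidable (Spec_solve nums N out) := by unfold Spec_solve; infer_instance

-- ===== CLAIM (what is proved, stated in full; the proofs are below) =====
def Claim_equal_solve : Prop := ∀ (nums : List Int) (N : Int), Dom_solve nums N → Pre_solve nums N → Spec_solve nums N (solve nums N)

-- ===== LEMMAS AND PROOFS =====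

-- number of elements of s₀ whose value (second component) is strictly above x
def cnt0 (s0 : List (Int × Int)) (x : Int) : Int :=
  ((s0.filter (fun e => x < e.2)).length : Int)

-- A's loop, processed from offset t.length, writes cnt0 s0 e.2 at index e.1 for each e,
-- provided the state hypothesis about the head holds.
theorem loopA_spec (s0 : List (Int × Int)) (hs : s0.Pairwise (fun a b => b.2 ≤ a.2)) :
    ∀ (s t : List (Int × Int)) (c p : Int) (r : List Int),
      s0 = t ++ s →
      (∀ q s', s = q :: s' → (if p ≠ q.2 then (t.length : Int) else c) = cnt0 s0 q.2) →
      ((PySem.List.enumerate s (t.length : Int)).foldl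
          (fun (st : Int × Int × List Int) q =>
            let count := if st.2.1 ≠ q.2.2 then q.1 else st.1
            (count, q.2.2, PySem.List.pySetD st.2.2 q.2.1 count))
          (c, p, r)).2.2
        = s.foldl (fun r e => PySem.List.pySetD r e.1 (cnt0 s0 e.2)) r := by
  intro s
  induction s with
  | nil => intro t c p r _ _; simp [PySem.List.enumerate]
  | cons q s' ih =>
    intro t c p r hfull hhead
    have hcq : (if p ≠ q.2 then (t.length : Int) else c) = cnt0 s0 q.2 := hhead q s' rfl
    rw [PySem.List.enumerate_cons]
    simp only [List.foldl_cons]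
    rw [hcq]
    have hlen : ((t.length : Int) + 1) = (((t ++ [q]).length : Nat) : Int) := by simp
    rw [hlen]
    apply ih (t ++ [q]) (cnt0 s0 q.2) q.2 _ (by simpa using hfull)
    intro q' s'' hs'
    subst hs'
    by_cases hne : q.2 = q'.2
    · simp [hne]
    · rw [if_pos hne]
      subst hfull
      have hsplit := hs
      rw [List.pairwise_append] at hsplit
      obtain ⟨_, htail, hcross⟩ := hsplit
      rw [List.pairwise_cons] at htail
      obtain ⟨hq, htail'⟩ := htail
      rw [List.pairwise_cons] at htail'
      obtain ⟨hq', _⟩ := htail'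
      have hqq' : q'.2 < q.2 := by
        have := hq q' (by simp)
        omega
      unfold cnt0
      rw [List.filter_append]
      have h1 : (t.filter (fun e => decide (q'.2 < e.2))) = t := by
        apply List.filter_eq_self.2
        intro a ha
        have := hcross a ha q (by simp)
        simp only [decide_eq_true_eq]
        omega
      have h3 : ((q' :: s'').filter (fun e => decide (q'.2 < e.2))) = [] := by
        apply List.filter_eq_nil_iff.2
        intro a ha
        rcases List.mem_cons.1 ha with h | h
        · subst h; simp
        · have := hq' a h
          simp only [decide_eq_true_eq]
          omega
      have h2 : ((q :: q' :: s'').filter (fun e => decide (q'.2 < e.2))) = [q] := by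
        rw [List.filter_cons_of_pos (by simpa using hqq'), h3]
      rw [h1, h2]

-- counting strictly greater values in a list of pairs = counting in the values list
theorem cnt0_enumerate (nums : List Int) (x : Int) :
    cnt0 (PySem.List.enumerate nums) x = ((nums.filter (fun y => x < y)).length : Int) := by
  unfold cnt0
  conv_rhs => rw [← PySem.List.map_snd_enumerate nums 0]
  rw [List.filter_map, List.length_map]
  rfl

theorem foldl_ext {A B : Type} (f g : B → A → B) (l : List A) (b : B)
    (h : ∀ (b : B) (a : A), a ∈ l → f b a = g b a) : l.foldl f b = l.foldl g b := by
  induction l generalizing b with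
  | nil => rfl
  | cons x xs ih =>
    simp only [List.foldl_cons]
    rw [h b x (by simp)]
    exact ih _ fun b a ha => h b a (List.mem_cons_of_mem _ ha)

theorem solve_spec' (nums : List Int) (N : Int) (_hpre : Pre_solve nums N) :
    solve nums N = solve_alt nums N := by
  unfold solve solve_alt
  simp only
  set results := List.replicate N.toNat (0 : Int) with hres
  have hmapid : (PySem.List.enumerate nums).map (fun p => (p.1, p.2)) = PySem.List.enumerate nums := by
    simp
  rw [hmapid]
  set ns := PySem.List.sorted (PySem.List.enumerate nums) (fun p => -p.2) false with hns
  have hperm : ns.Perm (PySem.List.enumerate nums) := PySem.List.sorted_perm _ _ _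
  have hsorted : ns.Pairwise (fun a b => b.2 ≤ a.2) := by
    have := PySem.List.sorted_pairwise (xs := PySem.List.enumerate nums) (key := fun p => -p.2)
    refine this.imp ?_
    intro a b h; omega
  -- A's loop computes the cnt0-scatter over ns
  have hA :
      ((PySem.List.enumerate ns).foldl
        (fun (st : Int × Int × List Int) q =>
          let count := if st.2.1 ≠ q.2.2 then q.1 else st.1
          (count, q.2.2, PySem.List.pySetD st.2.2 q.2.1 count))
        (0, -1, results)).2.2
      = ns.foldl (fun r e => PySem.List.pySetD r e.1 (cnt0 ns e.2)) results := by
    have := loopA_spec ns hsorted ns [] 0 (-1) results (by simp) ?_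
    · simpa using this
    · intro q s' hq
      have hmax : cnt0 ns q.2 = 0 := by
        unfold cnt0
        have : ns.filter (fun e => q.2 < e.2) = [] := by
          apply List.filter_eq_nil_iff.2
          intro a ha
          rw [hq] at hsorted ha
          rw [List.pairwise_cons] at hsorted
          rcases List.mem_cons.1 ha with h | h
          · subst h; simp
          · have := hsorted.1 a h; simp; omega
        rw [this]; rfl
      rw [hmax]
      split <;> rfl
  rw [hA]
  -- replace cnt0 ns by cnt0 over enumerate (a permutation) and then by the filter count
  have hcnt : ∀ x, cnt0 ns x = ((nums.filter (fun y => x < y)).length : Int) := by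
    intro x
    rw [← cnt0_enumerate nums x]
    unfold cnt0
    rw [(hperm.filter _).length_eq]
  have hfun :
      ns.foldl (fun r e => PySem.List.pySetD r e.1 (cnt0 ns e.2)) results
      = ns.foldl (fun r e => PySem.List.pySetD r e.1 ((nums.filter (fun y => e.2 < y)).length : Int)) results := by
    apply foldl_ext
    intro r e _
    rw [hcnt]
  rw [hfun]
  -- fold over a permutation with pairwise-distinct nonnegative indices: sets commute
  refine hperm.foldl_eq' ?_ results
  intro p hp q hq r
  rcases (PySem.List.mem_enumerate_iff _ _ _).1 (hperm.mem_iff.1 hp) with ⟨k, hk, rfl⟩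
  rcases (PySem.List.mem_enumerate_iff _ _ _).1 (hperm.mem_iff.1 hq) with ⟨k', hk', rfl⟩
  by_cases hkk : k = k'
  · subst hkk; rfl
  · simp only [zero_add, PySem.List.pySetD_natCast]
    exact List.set_comm _ _ hkk

-- ===== VERDICT (by name: the statement is the Claim_ definition above) =====
theorem solve_spec : Claim_equal_solve := by
  intro nums N _ hpre
  exact solve_spec' nums N hpre
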